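-- pv_equiv track=rewrite | github.com/yoonmgyg/lc | Problems/Compute Decimal Representation.py | decimalRepresentation
-- ===== SOURCE A (Python) =====
-- from typing import List
--
-- def decimalRepresentation(n: int) -> List[int]:
--     components = []
--     digit = 0
--     while n > 0:
--         current = n % 10
--         if (current != 0):
--             components.insert(0, (n % 10) * 10 ** digit)
--         n //= 10
--         digit += 1
--
--     return components
-- ===== SOURCE B (Python) =====
-- def decimalRepresentation(n):
--     # count the decimal digits of n, then read them most-significant-first
--     k = 0
--     m = n
--     while m > 0:
--         m //= 10
--         k += 1
--     components = []
--     for i in range(k - 1, -1, -1):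
--         d = n // 10 ** i % 10
--         if d != 0:
--             components.append(d * 10 ** i)
--     return components
-- ===== Notes on version B (the rewrite author's own statement) =====
-- stated objective: alternative
-- what changed: A repeatedly divides n, prepending each nonzero place-value at the front of the list; B first counts the digits and then reads the places most-significant-first with a direct floor-division/remainder formula, appending only, so no front-insertion is needed.
import Mathlib
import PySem

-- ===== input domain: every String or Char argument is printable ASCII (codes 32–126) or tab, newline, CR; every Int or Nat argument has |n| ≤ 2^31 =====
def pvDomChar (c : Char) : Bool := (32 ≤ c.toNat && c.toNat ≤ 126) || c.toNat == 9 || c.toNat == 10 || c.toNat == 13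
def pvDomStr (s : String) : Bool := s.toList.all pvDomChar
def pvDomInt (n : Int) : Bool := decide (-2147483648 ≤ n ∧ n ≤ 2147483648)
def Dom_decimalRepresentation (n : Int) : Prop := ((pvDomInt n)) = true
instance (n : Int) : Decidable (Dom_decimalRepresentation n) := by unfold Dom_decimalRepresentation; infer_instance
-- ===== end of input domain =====

-- B replaces A's divide-and-prepend loop (insert(0)) by counting the digits first and then
-- reading the nonzero place-values most-significant-first with a direct formula, appending only.

-- ===== PORT A =====
-- the while loop: state (components, n, digit); insert(0, x) prepends
def pvLoopA (n : Int) (digit : Nat) (components : List Int) : List Int :=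
  if 0 < n then
    pvLoopA (PySem.Int.floordiv n 10) (digit + 1)
      (if PySem.Int.mod n 10 ≠ 0 then PySem.Int.mod n 10 * 10 ^ digit :: components
       else components)
  else components
termination_by n.toNat
decreasing_by
  rw [PySem.Int.floordiv_eq_ediv_of_pos (by norm_num)]
  omega

def decimalRepresentation (n : Int) : List Int := pvLoopA n 0 []

-- ===== PORT B =====
-- the first while loop of B: count the decimal digits of n (m, k are the loop state)
def pvCountDigits (m : Int) (k : Int) : Int :=
  if 0 < m then pvCountDigits (PySem.Int.floordiv m 10) (k + 1) else k
termination_by m.toNat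
decreasing_by
  rw [PySem.Int.floordiv_eq_ediv_of_pos (by norm_num)]
  omega

-- the for-loop over range(k-1, -1, -1); k and the local d are inlined; 10 ** i with i ≥ 0 is 10 ^ i.toNat
def decimalRepresentation_alt (n : Int) : List Int :=
  (PySem.List.pyRange (pvCountDigits n 0 - 1) (-1) (-1)).foldl
    (fun components i =>
      if PySem.Int.mod (PySem.Int.floordiv n (10 ^ i.toNat)) 10 ≠ 0
      then components ++ [PySem.Int.mod (PySem.Int.floordiv n (10 ^ i.toNat)) 10 * 10 ^ i.toNat]
      else components)
    []

-- ===== PRECONDITION & SPEC =====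
def Spec_decimalRepresentation (n : Int) (out : List Int) : Prop := out = decimalRepresentation_alt n
instance (n : Int) (out : List Int) : Decidable (Spec_decimalRepresentation n out) := by unfold Spec_decimalRepresentation; infer_instance

-- ===== CLAIM (what is proved, stated in full; the proofs are below) =====
def Claim_equal_decimalRepresentation : Prop := ∀ (n : Int), Dom_decimalRepresentation n → Spec_decimalRepresentation n (decimalRepresentation n)

-- ===== LEMMAS AND PROOFS =====

-- reference shape: the list of nonzero place-values of n, least-significant digit at exponent d
def pvRef (n : Int) (d : Nat) : List Int :=
  if 0 < n then
    pvRef (n / 10) (d + 1) ++ (if n % 10 ≠ 0 then [n % 10 * 10 ^ d] else [])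
  else []
termination_by n.toNat
decreasing_by omega

-- number of decimal digits
def pvND (n : Int) : Nat := if 0 < n then pvND (n / 10) + 1 else 0
termination_by n.toNat
decreasing_by omega

theorem pvList_flatMap_congr {α β : Type} (l : List α) (f g : α → List β)
    (h : ∀ x ∈ l, f x = g x) : l.flatMap f = l.flatMap g := by
  induction l with
  | nil => rfl
  | cons a t ih =>
    simp only [List.flatMap_cons, h a (by simp), ih (fun x hx => h x (by simp [hx]))]

theorem pvFlatMap_map {α β γ : Type} (f : α → β) (g : β → List γ) (l : List α) :
    (l.map f).flatMap g = l.flatMap (fun x => g (f x)) := by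
  induction l with
  | nil => rfl
  | cons a t ih => simp [ih]

theorem pvLoopA_eq_ref (n : Int) (d : Nat) (acc : List Int) :
    pvLoopA n d acc = pvRef n d ++ acc := by
  induction n, d, acc using pvLoopA.induct with
  | case1 n d acc h ih =>
    rw [pvLoopA, if_pos h]
    rw [dite_eq_ite] at ih
    rw [ih]
    conv_rhs => rw [pvRef, if_pos h]
    rw [
      PySem.Int.floordiv_eq_ediv_of_pos (by norm_num : (0:Int) < 10),
      PySem.Int.mod_eq_emod_of_pos (by norm_num : (0:Int) < 10)]
    split_ifs with h2 <;> simp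
  | case2 n d acc h =>
    rw [pvLoopA, if_neg h, pvRef, if_neg h, List.nil_append]

theorem pvCountDigits_eq (m : Int) (k : Int) :
    pvCountDigits m k = (pvND m : Int) + k := by
  induction m, k using pvCountDigits.induct with
  | case1 m k h ih =>
    rw [pvCountDigits, if_pos h, ih,
      PySem.Int.floordiv_eq_ediv_of_pos (by norm_num : (0:Int) < 10)]
    conv_rhs => rw [pvND, if_pos h]
    push_cast
    ring
  | case2 m k h =>
    rw [pvCountDigits, if_neg h, pvND, if_neg h]
    simp

theorem pvND_zero_iff (n : Int) : pvND n = 0 ↔ ¬ 0 < n := by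
  rw [pvND]
  split_ifs with h <;> simp [h]

-- the core: pvRef written as a flatMap over the digit positions, most significant first
theorem pvRef_eq_flatMap (K : Nat) :
    ∀ (n : Int) (d : Nat), 0 ≤ n → pvND n = K →
      pvRef n d = ((List.range K).reverse).flatMap
        (fun i => if n / 10 ^ i % 10 ≠ 0 then [n / 10 ^ i % 10 * 10 ^ (i + d)] else []) := by
  induction K with
  | zero =>
    intro n d _ hK
    rw [pvRef, if_neg ((pvND_zero_iff n).mp hK)]
    simp
  | succ K ih =>
    intro n d hn hK
    have hpos : 0 < n := by
      by_contra h
      rw [(pvND_zero_iff n).mpr h] at hK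
      omega
    have hKd : pvND (n / 10) = K := by
      rw [pvND, if_pos hpos] at hK
      omega
    rw [pvRef, if_pos hpos, ih (n / 10) (d + 1) (Int.ediv_nonneg hn (by norm_num)) hKd]
    have hdig : ∀ i : Nat, n / 10 / 10 ^ i = n / 10 ^ (i + 1) := by
      intro i
      rw [Int.ediv_ediv_of_nonneg (by norm_num : (0:Int) ≤ 10), ← pow_succ']
    have hrange : (List.range (K + 1)).reverse
        = ((List.range K).reverse).map (· + 1) ++ [0] := by
      rw [List.range_succ_eq_map]
      simp
    rw [hrange, List.flatMap_append, pvFlatMap_map]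
    congr 1
    · apply pvList_flatMap_congr
      intro i _
      simp only [hdig i]
      have h3 : i + 1 + d = i + (d + 1) := by omega
      rw [h3]
    · simp

-- the countdown range as the reversed Nat range, cast to Int
theorem pvRange_countdown (K : Nat) :
    PySem.List.pyRange ((K : Int) - 1) (-1) (-1)
      = ((List.range K).reverse).map (fun i : Nat => (i : Int)) := by
  induction K with
  | zero =>
    rw [PySem.List.pyRange_neg_one_eq_nil (by norm_num)]
    simp
  | succ K ih =>
    have h : (-1 : Int) < ((K + 1 : Nat) : Int) - 1 := by push_cast; omega
    rw [PySem.List.pyRange_neg_one_cons h]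
    have h2 : ((K + 1 : Nat) : Int) - 1 - 1 = (K : Int) - 1 := by push_cast; ring
    have h3 : ((K + 1 : Nat) : Int) - 1 = (K : Int) := by push_cast; ring
    rw [h2, h3, ih, List.range_succ]
    simp

-- ===== VERDICT (by name: the statement is the Claim_ definition above) =====
theorem decimalRepresentation_spec : Claim_equal_decimalRepresentation := by
  intro n _
  unfold Spec_decimalRepresentation decimalRepresentation decimalRepresentation_alt
  rw [pvCountDigits_eq, add_zero]
  by_cases hpos : 0 < n
  · have hn : 0 ≤ n := le_of_lt hpos
    rw [pvLoopA_eq_ref, List.append_nil,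
      pvRef_eq_flatMap (pvND n) n 0 hn rfl, pvRange_countdown]
    -- turn the foldl with conditional append into a flatMap
    have hfold : ∀ (l : List Int) (init : List Int),
        l.foldl (fun components i =>
          if PySem.Int.mod (PySem.Int.floordiv n (10 ^ i.toNat)) 10 ≠ 0
          then components ++ [PySem.Int.mod (PySem.Int.floordiv n (10 ^ i.toNat)) 10 * 10 ^ i.toNat]
          else components) init
        = init ++ l.flatMap (fun i =>
            if PySem.Int.mod (PySem.Int.floordiv n (10 ^ i.toNat)) 10 ≠ 0
            then [PySem.Int.mod (PySem.Int.floordiv n (10 ^ i.toNat)) 10 * 10 ^ i.toNat]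
            else []) := by
      intro l init
      rw [← PySem.List.foldl_append_eq_flatMap]
      apply PySem.List.foldl_congr_mem
      intro acc x _
      split_ifs <;> simp
    rw [hfold, List.nil_append]
    rw [pvFlatMap_map]
    apply pvList_flatMap_congr
    intro i _
    simp only [Int.toNat_natCast,
      PySem.Int.floordiv_eq_ediv_of_pos (pow_pos (by norm_num : (0:Int) < 10) i),
      PySem.Int.mod_eq_emod_of_pos (by norm_num : (0:Int) < 10), add_zero]
  · -- n ≤ 0: both programs return []
    have hnd : pvND n = 0 := (pvND_zero_iff n).mpr hpos
    rw [pvLoopA, if_neg hpos, hnd,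
      show ((0 : Nat) : Int) - 1 = (-1 : Int) by norm_num,
      PySem.List.pyRange_neg_one_eq_nil (by norm_num)]
    rfl
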